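-- pv_equiv track=rewrite | github.com/gustin33/project_euler | 001-100/57/main.py | number_of_fractions
-- ===== SOURCE A (Python) =====
-- def first_x_cterms(x):
--     list_c = [1, 2]
--     j = 2
--     while j < x:
--         list_c.append(2*list_c[j-1]+list_c[j-2])
--         j += 1
--     return list_c
--
-- def number_of_digits(n):
--     return len(list(str(n)))
--
-- def number_of_fractions(n):
--     n += 1
--     list1 = first_x_cterms(n)
--     s = 0
--     for num in range(1, n):
--         numerator = list1[num-1] + list1[num]
--         denominator = list1[num]
--         if number_of_digits(numerator) > number_of_digits(denominator):
--             s += 1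
--     return s
-- ===== SOURCE B (Python) =====
-- def number_of_fractions(n):
--     p = q = 1
--     s = 0
--     for _ in range(n):
--         p, q = p + 2 * q, p + q
--         if len(str(p)) > len(str(q)):
--             s += 1
--     return s
-- ===== Notes on version B (the rewrite author's own statement) =====
-- stated objective: simpler
-- what changed: Replaced A's two-pass design (precompute the whole c-term table, then re-index it to rebuild each numerator/denominator) with a single streaming loop maintaining the convergent pair (p,q) via p,q = p+2q, p+q and counting digit differences on the fly.
import Mathlib
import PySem

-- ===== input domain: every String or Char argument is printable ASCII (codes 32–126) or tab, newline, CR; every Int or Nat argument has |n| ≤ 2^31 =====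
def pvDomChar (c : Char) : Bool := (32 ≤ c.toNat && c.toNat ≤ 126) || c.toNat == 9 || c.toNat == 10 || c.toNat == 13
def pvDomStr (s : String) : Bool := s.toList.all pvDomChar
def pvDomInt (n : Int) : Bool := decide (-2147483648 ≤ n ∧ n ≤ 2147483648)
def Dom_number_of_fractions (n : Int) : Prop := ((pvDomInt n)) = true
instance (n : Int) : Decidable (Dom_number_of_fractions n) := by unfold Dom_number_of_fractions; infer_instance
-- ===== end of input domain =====

-- B replaces A's two-pass 'build the full c-term table, then re-index it' with a single
-- streaming loop maintaining the convergent pair (p, q); objective: simpler (return value only).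

-- ===== PORT A =====
-- while j < x: list_c.append(2*list_c[j-1] + list_c[j-2]); j += 1
-- (indices j-1, j-2 are always in range since the list has length j, so pyGetD is exact here)
def first_x_cterms_loop (x : Int) (listc : List Int) (j : Int) : List Int :=
  if j < x then
    first_x_cterms_loop x
      (listc ++ [2 * PySem.List.pyGetD listc (j - 1) 0 + PySem.List.pyGetD listc (j - 2) 0])
      (j + 1)
  else listc
termination_by (x - j).toNat
decreasing_by omega

def first_x_cterms (x : Int) : List Int := first_x_cterms_loop x [1, 2] 2

-- len(list(str(n)))
def number_of_digits (n : Int) : Int := PySem.List.len (PySem.Int.toStr n).toList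

def number_of_fractions (n : Int) : Int :=
  let n' := n + 1
  let list1 := first_x_cterms n'
  (PySem.List.pyRange 1 n').foldl (fun s num =>
    let numerator := PySem.List.pyGetD list1 (num - 1) 0 + PySem.List.pyGetD list1 num 0
    let denominator := PySem.List.pyGetD list1 num 0
    if number_of_digits numerator > number_of_digits denominator then s + 1 else s) 0

-- ===== PORT B =====
def number_of_fractions_alt (n : Int) : Int :=
  ((PySem.List.pyRange 0 n).foldl (fun (st : Int × Int × Int) _ =>
      let p := st.1 + 2 * st.2.1
      let q := st.1 + st.2.1
      (p, q,
        if PySem.List.len (PySem.Int.toStr p).toList > PySem.List.len (PySem.Int.toStr q).toList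
        then st.2.2 + 1 else st.2.2)) (1, 1, 0)).2.2

-- ===== PRECONDITION & SPEC =====
def Spec_number_of_fractions (n : Int) (out : Int) : Prop := out = number_of_fractions_alt n
instance (n : Int) (out : Int) : Decidable (Spec_number_of_fractions n out) := by unfold Spec_number_of_fractions; infer_instance

-- ===== CLAIM (what is proved, stated in full; the proofs are below) =====
def Claim_equal_number_of_fractions : Prop := ∀ (n : Int), Dom_number_of_fractions n → Spec_number_of_fractions n (number_of_fractions n)

-- ===== LEMMAS AND PROOFS =====

-- the continued-fraction denominators c 0 = 1, c 1 = 2, c (k+2) = 2*c (k+1) + c k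
def cden : Nat → Int
  | 0 => 1
  | 1 => 2
  | (k + 2) => 2 * cden (k + 1) + cden k

-- the count of the first m convergents (3/2, 7/5, …) whose numerator has more digits
def countC : Nat → Int
  | 0 => 0
  | (m + 1) => countC m +
      (if number_of_digits (cden m + cden (m + 1)) > number_of_digits (cden (m + 1)) then 1 else 0)

lemma first_x_cterms_loop_eq (fuel : Nat) :
    ∀ (x : Int) (j : Nat), 2 ≤ j → (x - j).toNat = fuel →
    first_x_cterms_loop x ((List.range j).map cden) j = (List.range (max x.toNat j)).map cden := by
  induction fuel with
  | zero =>
    intro x j hj hf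
    rw [first_x_cterms_loop]
    have hxj : ¬ ((j : Int) < x) := by omega
    simp only [hxj, if_false]
    have : max x.toNat j = j := by omega
    rw [this]
  | succ f ih =>
    intro x j hj hf
    rw [first_x_cterms_loop]
    have hxj : (j : Int) < x := by omega
    simp only [hxj, if_true]
    have h1 : (j : Int) - 1 = ((j - 1 : Nat) : Int) := by omega
    have h2 : (j : Int) - 2 = ((j - 2 : Nat) : Int) := by omega
    rw [h1, h2, PySem.List.pyGetD_natCast, PySem.List.pyGetD_natCast,
        PySem.List.getD_map_range _ _ _ _ (by omega), PySem.List.getD_map_range _ _ _ _ (by omega)]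
    have hstep : (List.range j).map cden ++ [2 * cden (j - 1) + cden (j - 2)]
        = (List.range (j + 1)).map cden := by
      rw [List.range_succ, List.map_append, List.map_singleton]
      congr 1
      obtain ⟨k, rfl⟩ : ∃ k, j = k + 2 := ⟨j - 2, by omega⟩
      simp [cden]
    rw [hstep]
    have hcast : ((j : Int) + 1) = ((j + 1 : Nat) : Int) := by omega
    rw [hcast, ih x (j + 1) (by omega) (by omega)]
    have hmax : max x.toNat (j + 1) = max x.toNat j := by omega
    rw [hmax]

lemma first_x_cterms_eq (x : Int) :
    first_x_cterms x = (List.range (max x.toNat 2)).map cden := by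
  have h : ([1, 2] : List Int) = (List.range 2).map cden := by decide
  rw [first_x_cterms, h]
  exact first_x_cterms_loop_eq (x - 2).toNat x 2 (by omega) rfl

-- A's fold over range(1, m+1), with the list lookups already replaced by cden
lemma A_fold (m : Nat) (s0 : Int) :
    (PySem.List.pyRange 1 ((m : Int) + 1)).foldl (fun s num =>
        if number_of_digits (cden (num.toNat - 1) + cden num.toNat) >
           number_of_digits (cden num.toNat) then s + 1 else s) s0
      = s0 + countC m := by
  induction m generalizing s0 with
  | zero =>
    have h0 : PySem.List.pyRange 1 (((0 : Nat) : Int) + 1) = [] := by decide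
    rw [h0]
    simp [countC]
  | succ m ih =>
    have hcast : (((m + 1 : Nat) : Int) + 1) = ((m : Int) + 1) + 1 := by push_cast; ring
    rw [hcast, PySem.List.pyRange_one_succ_right (by omega), List.foldl_append, ih]
    have ht : ((m : Int) + 1).toNat = m + 1 := by omega
    simp only [List.foldl_cons, List.foldl_nil, ht]
    have hm1 : m + 1 - 1 = m := by omega
    rw [hm1, countC]
    split_ifs <;> ring

lemma A_eq_countC (n : Int) : number_of_fractions n = countC n.toNat := by
  by_cases hn : 0 ≤ n
  · obtain ⟨m, rfl⟩ : ∃ m : Nat, n = (m : Int) := ⟨n.toNat, by omega⟩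
    show (PySem.List.pyRange 1 ((m : Int) + 1)).foldl _ 0 = _
    rw [PySem.List.foldl_congr_mem _ _ (fun s num =>
        if number_of_digits (cden (num.toNat - 1) + cden num.toNat) >
           number_of_digits (cden num.toNat) then s + 1 else s) 0 ?_]
    · rw [A_fold m 0, Int.toNat_natCast, zero_add]
    · intro acc num hmem
      rw [PySem.List.mem_pyRange_one] at hmem
      have hM : 2 ≤ max ((m : Int) + 1).toNat 2 := by omega
      have h1 : num = ((num.toNat : Nat) : Int) := by omega
      have h2 : num - 1 = ((num.toNat - 1 : Nat) : Int) := by omega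
      simp only [first_x_cterms_eq]
      rw [h2, h1, PySem.List.pyGetD_natCast, PySem.List.pyGetD_natCast,
          PySem.List.getD_map_range _ _ _ _ (by omega), PySem.List.getD_map_range _ _ _ _ (by omega)]
      simp only [Int.toNat_natCast]
      rfl
  · have hempty : PySem.List.pyRange 1 (n + 1) = [] := by
      simp [PySem.List.pyRange]; omega
    have ht : n.toNat = 0 := by omega
    show (PySem.List.pyRange 1 (n + 1)).foldl _ 0 = _
    rw [hempty, ht]
    rfl

-- B's streaming state after m steps: the pair (cden m + cden (m+1) implicit via pq) and the count
lemma B_fold (m : Nat) :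
    (PySem.List.pyRange 0 (m : Int)).foldl (fun (st : Int × Int × Int) _ =>
      let p := st.1 + 2 * st.2.1
      let q := st.1 + st.2.1
      (p, q,
        if PySem.List.len (PySem.Int.toStr p).toList > PySem.List.len (PySem.Int.toStr q).toList
        then st.2.2 + 1 else st.2.2)) (1, 1, 0)
    = (if m = 0 then (1, 1, 0) else (cden (m - 1) + cden m, cden m, countC m)) := by
  induction m with
  | zero => decide
  | succ m ih =>
    have hcast : ((m + 1 : Nat) : Int) = (m : Int) + 1 := by push_cast; ring
    rw [hcast, PySem.List.pyRange_one_succ_right (by omega), List.foldl_append, ih]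
    cases m with
    | zero =>
      have : countC 1 = 0 + (if number_of_digits (cden 0 + cden 1) > number_of_digits (cden 1)
          then 1 else 0) := by rw [countC]; rw [countC]
      simp [cden, countC, number_of_digits, PySem.List.len_eq]
    | succ k =>
      simp only [Nat.succ_ne_zero, if_false, List.foldl_cons, List.foldl_nil]
      have hk : k + 1 - 1 = k := by omega
      have hk2 : k + 1 + 1 - 1 = k + 1 := by omega
      rw [hk, hk2]
      have hp : cden k + cden (k + 1) + 2 * cden (k + 1) = cden (k + 1) + cden (k + 2) := by
        rw [show cden (k + 2) = 2 * cden (k + 1) + cden k from rfl]; ring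
      have hq : cden k + cden (k + 1) + cden (k + 1) = cden (k + 2) := by
        rw [show cden (k + 2) = 2 * cden (k + 1) + cden k from rfl]; ring
      simp only [hp, hq]
      rw [show countC (k + 2) = countC (k + 1) +
          (if number_of_digits (cden (k + 1) + cden (k + 2)) > number_of_digits (cden (k + 2))
           then 1 else 0) from rfl]
      simp only [number_of_digits, PySem.List.len_eq]
      split_ifs <;> simp

lemma B_eq_countC (n : Int) : number_of_fractions_alt n = countC n.toNat := by
  by_cases hn : 0 ≤ n
  · obtain ⟨m, rfl⟩ : ∃ m : Nat, n = (m : Int) := ⟨n.toNat, by omega⟩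
    unfold number_of_fractions_alt
    rw [B_fold m, Int.toNat_natCast]
    cases m with
    | zero => rfl
    | succ k => simp
  · have hempty : PySem.List.pyRange 0 n = [] := by
      simp [PySem.List.pyRange]; omega
    have ht : n.toNat = 0 := by omega
    unfold number_of_fractions_alt
    rw [hempty, ht]
    rfl

-- ===== VERDICT (by name: the statement is the Claim_ definition above) =====
theorem number_of_fractions_spec : Claim_equal_number_of_fractions := by
  intro n _
  show number_of_fractions n = number_of_fractions_alt n
  rw [A_eq_countC, B_eq_countC]
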